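-- pv_equiv track=rewrite | github.com/21zaber/mai-mag | olymp/23.09.18/d.py | solve
-- ===== SOURCE A (Python) =====
-- def _solve(x, y):
--     t = y + 2 * x
--     if t % 5 == 0:
--         i = t // 5
--         return i, x - 2 * i
--     else:
--         return None
--
-- def solve(x, y):
--     l = [[0, 0], [1, 0], [-1, 0], [0, 1], [0, -1]]
--
--     for k in l:
--         nx = x + k[0]
--         ny = y + k[1]
--         r = _solve(nx, ny)
--         if r is not None:
--             return r
-- ===== SOURCE B (Python) =====
-- def solve(x, y):
--     # Exactly one of the five perturbations makes t = y + 2x divisible by 5;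
--     # pick it directly from the required residue, no search loop.
--     table = {0: (0, 0), 2: (1, 0), 3: (-1, 0), 1: (0, 1), 4: (0, -1)}
--     dx, dy = table[(-(y + 2 * x)) % 5]
--     nx = x + dx
--     ny = y + dy
--     i = (ny + 2 * nx) // 5
--     return i, nx - 2 * i
-- ===== Notes on version B (the rewrite author's own statement) =====
-- stated objective: simpler
-- what changed: Replaces the 5-candidate search loop (with its helper _solve) by a direct computation: the required residue (-(y+2x)) % 5 selects the unique perturbation from a 5-entry table, then the answer is returned in closed form.
import Mathlib
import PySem

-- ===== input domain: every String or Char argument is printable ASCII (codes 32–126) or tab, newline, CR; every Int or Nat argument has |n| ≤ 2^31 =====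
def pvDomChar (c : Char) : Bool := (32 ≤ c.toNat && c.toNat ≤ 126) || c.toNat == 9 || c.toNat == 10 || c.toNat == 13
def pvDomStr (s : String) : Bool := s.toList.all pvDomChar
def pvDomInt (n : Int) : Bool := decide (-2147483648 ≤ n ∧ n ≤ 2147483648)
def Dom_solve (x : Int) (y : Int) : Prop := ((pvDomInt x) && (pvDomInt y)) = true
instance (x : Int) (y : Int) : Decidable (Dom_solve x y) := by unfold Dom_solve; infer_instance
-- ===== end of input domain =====

-- B replaces A's 5-candidate search loop by a direct residue lookup plus a closed-form return (objective: simpler).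

-- ===== PORT A =====
-- helper _solve of A
def pySolveOne (x : Int) (y : Int) : Option (Int × Int) :=
  let t := y + 2 * x
  if PySem.Int.mod t 5 = 0 then
    let i := PySem.Int.floordiv t 5
    some (i, x - 2 * i)
  else
    none

-- the 'for k in l' loop with early return
def solveLoop (x : Int) (y : Int) : List (Int × Int) → Option (Int × Int)
  | [] => none
  | k :: rest =>
    let nx := x + k.1
    let ny := y + k.2
    match pySolveOne nx ny with
    | some r => some r
    | none => solveLoop x y rest

def solve (x : Int) (y : Int) : Option (Int × Int) :=
  solveLoop x y [(0, 0), (1, 0), (-1, 0), (0, 1), (0, -1)]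

-- ===== PORT B =====
def solve_alt (x : Int) (y : Int) : Option (Int × Int) :=
  let table : PySem.Dict Int (Int × Int) :=
    PySem.Dict.ofList [(0, (0, 0)), (2, (1, 0)), (3, (-1, 0)), (1, (0, 1)), (4, (0, -1))]
  match table.get? (PySem.Int.mod (-(y + 2 * x)) 5) with
  | none => none   -- unreachable: the residue is always in {0,1,2,3,4} (Python would raise KeyError)
  | some (dx, dy) =>
    let nx := x + dx
    let ny := y + dy
    let i := PySem.Int.floordiv (ny + 2 * nx) 5
    some (i, nx - 2 * i)

-- ===== PRECONDITION & SPEC =====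
def Spec_solve (x : Int) (y : Int) (out : Option (Int × Int)) : Prop := out = solve_alt x y
instance (x : Int) (y : Int) (out : Option (Int × Int)) : Decidable (Spec_solve x y out) := by unfold Spec_solve; infer_instance

-- ===== CLAIM (what is proved, stated in full; the proofs are below) =====
def Claim_equal_solve : Prop := ∀ (x : Int) (y : Int), Dom_solve x y → Spec_solve x y (solve x y)

-- ===== LEMMAS AND PROOFS =====
theorem solve_eq_alt (x y : Int) : solve x y = solve_alt x y := by
  have h5 : (0:Int) < 5 := by norm_num
  have hm : (y + 2 * x) % 5 = 0 ∨ (y + 2 * x) % 5 = 1 ∨ (y + 2 * x) % 5 = 2 ∨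
      (y + 2 * x) % 5 = 3 ∨ (y + 2 * x) % 5 = 4 := by omega
  have e : ∀ a : Int, PySem.Int.mod a 5 = a % 5 := fun a => PySem.Int.mod_eq_emod_of_pos h5
  unfold solve solve_alt
  rcases hm with h | h | h | h | h
  · rw [show PySem.Int.mod (-(y + 2 * x)) 5 = 0 by rw [e]; omega]
    simp [solveLoop, pySolveOne, h, PySem.Dict.ofList, PySem.Dict.update, PySem.Dict.empty,
      PySem.Dict.insert, PySem.Dict.get?, PySem.Dict.contains]
  · rw [show PySem.Int.mod (-(y + 2 * x)) 5 = 4 by rw [e]; omega]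
    simp only [solveLoop, pySolveOne]
    rw [if_neg (by rw [e]; omega), if_neg (by rw [e]; omega), if_neg (by rw [e]; omega),
      if_neg (by rw [e]; omega), if_pos (by rw [e]; omega)]
    simp [PySem.Dict.ofList, PySem.Dict.update, PySem.Dict.empty,
      PySem.Dict.insert, PySem.Dict.get?, PySem.Dict.contains]
  · rw [show PySem.Int.mod (-(y + 2 * x)) 5 = 3 by rw [e]; omega]
    simp only [solveLoop, pySolveOne]
    rw [if_neg (by rw [e]; omega), if_neg (by rw [e]; omega), if_pos (by rw [e]; omega)]
    simp [PySem.Dict.ofList, PySem.Dict.update, PySem.Dict.empty,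
      PySem.Dict.insert, PySem.Dict.get?, PySem.Dict.contains]
  · rw [show PySem.Int.mod (-(y + 2 * x)) 5 = 2 by rw [e]; omega]
    simp only [solveLoop, pySolveOne]
    rw [if_neg (by rw [e]; omega), if_pos (by rw [e]; omega)]
    simp [PySem.Dict.ofList, PySem.Dict.update, PySem.Dict.empty,
      PySem.Dict.insert, PySem.Dict.get?, PySem.Dict.contains]
  · rw [show PySem.Int.mod (-(y + 2 * x)) 5 = 1 by rw [e]; omega]
    simp only [solveLoop, pySolveOne]
    rw [if_neg (by rw [e]; omega), if_neg (by rw [e]; omega), if_neg (by rw [e]; omega),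
      if_pos (by rw [e]; omega)]
    simp [PySem.Dict.ofList, PySem.Dict.update, PySem.Dict.empty,
      PySem.Dict.insert, PySem.Dict.get?, PySem.Dict.contains]

-- ===== VERDICT (by name: the statement is the Claim_ definition above) =====
theorem solve_spec : Claim_equal_solve := by
  intro x y _
  unfold Spec_solve
  exact solve_eq_alt x y
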